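-- pv_equiv track=rewrite | github.com/venomouscyanide/TrafficProblem | Functions/logic.py | print_the_fastest
-- ===== SOURCE A (Python) =====
-- def print_the_fastest(list_of_times,priority):
-- 	'''
-- 	function to get the fastest vehicle and return based
-- 	on priority chosen in case of many vehicles with same fastest time
-- 	'''
-- 	min_time=list_of_times[0][1]
--
-- 	'''
-- 	create a set of fastest vehicles
-- 	'''
-- 	vehicle_fastest=set()
-- 	for i in list_of_times:
-- 		if(i[1]==min_time):
-- 			vehicle_fastest.add(i[2])
--
-- 	'''
-- 	the logic to get the fastest vehicle in case there
-- 	are more than one vehicle with the same min_time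
-- 	the priority chosen is as follows
-- 	bike>tuktuk>car
-- 	'''
-- 	sorted_vehicles=[]
-- 	for i in range(len(priority)):
-- 		if(priority[i] in vehicle_fastest):
-- 			sorted_vehicles.append(priority[i])
--
-- 	'''
-- 	return the vehicle with the most priority as mentioned above
-- 	'''
-- 	return(sorted_vehicles[0])
-- ===== SOURCE B (Python) =====
-- def print_the_fastest(list_of_times, priority):
--     '''
--     Alternative: no intermediate set; for each priority candidate, rescan
--     list_of_times for a matching fastest entry (break on first hit).
--     '''
--     min_time = list_of_times[0][1]
--     matches = []
--     for p in priority: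
--         for entry in list_of_times:
--             if entry[1] == min_time and entry[2] == p:
--                 matches.append(p)
--                 break
--     return matches[0]
-- ===== Notes on version B (the rewrite author's own statement) =====
-- stated objective: alternative
-- what changed: Replaces A's set-building pass over list_of_times followed by a priority filter with a direct per-priority rescan of list_of_times (break on first hit), eliminating the intermediate set.
import Mathlib
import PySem

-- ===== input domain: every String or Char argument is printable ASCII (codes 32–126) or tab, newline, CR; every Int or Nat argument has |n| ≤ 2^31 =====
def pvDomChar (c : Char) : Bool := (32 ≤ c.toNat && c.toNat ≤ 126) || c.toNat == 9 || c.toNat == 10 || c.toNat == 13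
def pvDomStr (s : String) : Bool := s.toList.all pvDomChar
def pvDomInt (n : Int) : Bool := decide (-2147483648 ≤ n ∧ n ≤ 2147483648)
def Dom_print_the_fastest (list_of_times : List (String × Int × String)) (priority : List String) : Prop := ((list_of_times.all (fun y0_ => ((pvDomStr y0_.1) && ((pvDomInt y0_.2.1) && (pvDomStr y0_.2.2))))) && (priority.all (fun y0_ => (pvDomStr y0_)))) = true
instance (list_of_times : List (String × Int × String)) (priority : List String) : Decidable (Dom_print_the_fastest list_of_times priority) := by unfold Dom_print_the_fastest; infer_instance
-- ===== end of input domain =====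

-- B differs from A only in structure: A builds a set of fastest vehicles then filters
-- priority through it; B rescans list_of_times per priority candidate (break on first hit).

-- ===== PORT A =====
def print_the_fastest (list_of_times : List (String × Int × String)) (priority : List String) : String :=
  let min_time := (PySem.List.pyGetD list_of_times 0 ("", 0, "")).2.1   -- list_of_times[0][1]; Pre_ excludes []
  let vehicle_fastest : PySem.Set String :=
    list_of_times.foldl (fun s i => if i.2.1 == min_time then PySem.Set.add s i.2.2 else s) PySem.Set.empty
  let sorted_vehicles : List String :=
    (PySem.List.pyRange 0 (priority.length : Int) 1).foldl
      (fun acc i =>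
        if PySem.Set.contains vehicle_fastest (PySem.List.pyGetD priority i "") then
          acc ++ [PySem.List.pyGetD priority i ""]
        else acc) []
  PySem.List.pyGetD sorted_vehicles 0 ""   -- sorted_vehicles[0]; Pre_ excludes the no-match case

-- ===== PORT B =====
-- inner 'for entry in list_of_times: … break' of Source B: true on the first matching entry
def pvScan : List (String × Int × String) → Int → String → Bool
  | [], _, _ => false
  | entry :: rest, m, p => if entry.2.1 == m && entry.2.2 == p then true else pvScan rest m p

def print_the_fastest_alt (list_of_times : List (String × Int × String)) (priority : List String) : String :=
  let min_time := (PySem.List.pyGetD list_of_times 0 ("", 0, "")).2.1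
  let hits : List String :=
    priority.foldl (fun acc p => if pvScan list_of_times min_time p then acc ++ [p] else acc) []
  PySem.List.pyGetD hits 0 ""

-- ===== PRECONDITION & SPEC =====
-- Pre_ excludes exactly the inputs where Python A raises IndexError: an empty
-- list_of_times, or no priority entry naming a vehicle with the first entry's time.
def Pre_print_the_fastest (list_of_times : List (String × Int × String)) (priority : List String) : Prop :=
  list_of_times ≠ [] ∧
  (priority.any (fun p => list_of_times.any (fun i =>
    i.2.1 == (PySem.List.pyGetD list_of_times 0 ("", 0, "")).2.1 && i.2.2 == p))) = true
instance (list_of_times : List (String × Int × String)) (priority : List String) : Decidable (Pre_print_the_fastest list_of_times priority) := by unfold Pre_print_the_fastest; infer_instance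

def pvWitness_print_the_fastest : (List (String × Int × String)) × List String :=
  ([("x", 3, "car"), ("y", 3, "bike")], ["bike", "tuktuk", "car"])

def Spec_print_the_fastest (list_of_times : List (String × Int × String)) (priority : List String) (out : String) : Prop := out = print_the_fastest_alt list_of_times priority
instance (list_of_times : List (String × Int × String)) (priority : List String) (out : String) : Decidable (Spec_print_the_fastest list_of_times priority out) := by unfold Spec_print_the_fastest; infer_instance

-- ===== CLAIM (what is proved, stated in full; the proofs are below) =====
def Claim_equal_print_the_fastest : Prop := ∀ (list_of_times : List (String × Int × String)) (priority : List String), Dom_print_the_fastest list_of_times priority → Pre_print_the_fastest list_of_times priority → Spec_print_the_fastest list_of_times priority (print_the_fastest list_of_times priority)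

-- ===== LEMMAS AND PROOFS =====

-- A's set-building loop: membership in the accumulated set
lemma mem_setFold (lt : List (String × Int × String)) (m : Int) (s : PySem.Set String) (p : String) :
    p ∈ lt.foldl (fun s i => if i.2.1 == m then PySem.Set.add s i.2.2 else s) s ↔
      p ∈ s ∨ ∃ i ∈ lt, i.2.1 = m ∧ i.2.2 = p := by
  induction lt generalizing s with
  | nil => simp
  | cons h t ih =>
    rw [List.foldl_cons]
    by_cases hm : h.2.1 = m
    · rw [if_pos (show (h.2.1 == m) = true by simp [hm]), ih, PySem.Set.mem_add,
        List.exists_mem_cons_iff]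
      constructor
      · rintro ((hs | hp) | E)
        exacts [Or.inl hs, Or.inr (Or.inl ⟨hm, hp.symm⟩), Or.inr (Or.inr E)]
      · rintro (hs | (⟨_, hp⟩ | E))
        exacts [Or.inl (Or.inl hs), Or.inl (Or.inr hp.symm), Or.inr E]
    · rw [if_neg (show ¬ (h.2.1 == m) = true by simp [hm]), ih, List.exists_mem_cons_iff]
      constructor
      · rintro (hs | E)
        exacts [Or.inl hs, Or.inr (Or.inr E)]
      · rintro (hs | (⟨h1, _⟩ | E))
        exacts [Or.inl hs, absurd h1 hm, Or.inr E]

-- B's inner scan: true exactly when some entry matches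
lemma pvScan_iff (lt : List (String × Int × String)) (m : Int) (p : String) :
    pvScan lt m p = true ↔ ∃ i ∈ lt, i.2.1 = m ∧ i.2.2 = p := by
  induction lt with
  | nil => simp [pvScan]
  | cons h t ih =>
    by_cases hm : h.2.1 = m ∧ h.2.2 = p
    · simp [pvScan, hm.1, hm.2]
    · have : ¬ (h.2.1 == m && h.2.2 == p) = true := by
        simp only [Bool.and_eq_true, beq_iff_eq]; tauto
      simp only [pvScan, if_neg this, ih, List.mem_cons]
      constructor
      · rintro ⟨i, hi, hp⟩; exact ⟨i, Or.inr hi, hp⟩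
      · rintro ⟨i, hi | hi, hp⟩
        · exact absurd (hi ▸ hp) hm
        · exact ⟨i, hi, hp⟩

-- the two membership tests coincide
lemma contains_eq_pvScan (lt : List (String × Int × String)) (m : Int) (p : String) :
    PySem.Set.contains
      (lt.foldl (fun s i => if i.2.1 == m then PySem.Set.add s i.2.2 else s) PySem.Set.empty) p
      = pvScan lt m p := by
  rcases hb : pvScan lt m p with _ | _
  · have := (pvScan_iff lt m p)
    rw [hb] at this
    simp only [Bool.false_eq_true, false_iff] at this
    rcases hc : PySem.Set.contains _ p with _ | _
    · rfl
    · exfalso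
      have hmem := (PySem.Set.contains_iff _ p).mp hc
      rw [mem_setFold] at hmem
      rcases hmem with h | h
      · simp [PySem.Set.empty] at h
      · exact this h
  · apply (PySem.Set.contains_iff _ p).mpr
    rw [mem_setFold]
    exact Or.inr ((pvScan_iff lt m p).mp hb)

-- ===== VERDICT (by name: the statement is the Claim_ definition above) =====
theorem print_the_fastest_spec : Claim_equal_print_the_fastest := by
  intro lt pr _ _
  dsimp only [Spec_print_the_fastest, print_the_fastest, print_the_fastest_alt]
  congr 1
  rw [PySem.List.foldl_pyRange_zero_pyGetD' pr ""
        (fun acc x => if PySem.Set.contains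
          (lt.foldl (fun s i => if i.2.1 == (PySem.List.pyGetD lt 0 ("", 0, "")).2.1 then PySem.Set.add s i.2.2 else s)
          PySem.Set.empty) x then acc ++ [x] else acc) []]
  have hf : (fun (acc : List String) x =>
      if PySem.Set.contains
        (lt.foldl (fun s i => if i.2.1 == (PySem.List.pyGetD lt 0 ("", 0, "")).2.1 then PySem.Set.add s i.2.2 else s)
          PySem.Set.empty) x then acc ++ [x] else acc)
      = (fun (acc : List String) p =>
          if pvScan lt (PySem.List.pyGetD lt 0 ("", 0, "")).2.1 p then acc ++ [p] else acc) := by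
    funext acc x
    rw [contains_eq_pvScan]
  rw [hf]
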